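-- pv_equiv track=rewrite | github.com/ggs4ggs4/CP-and-DSA | Google/q1.py | solve
-- ===== SOURCE A (Python) =====
-- def solve(arr,k):
--     arr.sort()
--     idx_arr = []
--     tmp=sorted(list(set(arr)))
--     tmp.insert(0,0)
--     tmp.append(k+1)
--     for i in range(len(tmp)-1):
--         if (tmp[i]==tmp[i+1]-1):
--             continue
--         idx_arr.append([tmp[i],tmp[i+1]-1])
--     lens=[]
--     m=-1
--     for i in idx_arr:
--         d=i[1]-i[0]
--         if i[0]==0:
--             lens.append(i[1]-i[0])
--         elif i[1]==k:
--             lens.append(i[1]-i[0])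
--         else:
--             if d%2==0:
--                 lens.append((i[1]-i[0])//2)
--             else:
--                 lens.append(((i[1]-i[0])//2)+1)
--         if d>m:
--             m=d
--     lens.sort()
--     if len(lens)>=2 and lens[-1]+lens[-2]>m:
--         return lens[-1]+lens[-2]
--     else:
--         if m==-1:
--             return 0
--         return m
-- ===== SOURCE B (Python) =====
-- def solve(arr, k):
--     # Single fused pass over consecutive distinct values, keeping only the two
--     # largest contributions and the largest gap in scalars (no idx_arr/lens lists,
--     # no second sort).  arr is sorted in place, like the original.
--     arr.sort()
--     tmp = [0] + sorted(set(arr)) + [k + 1]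
--     m = -1
--     b1 = b2 = None
--     for lo, nxt in zip(tmp, tmp[1:]):
--         hi = nxt - 1
--         if lo == hi:
--             continue
--         d = hi - lo
--         if d > m:
--             m = d
--         if lo == 0 or hi == k:
--             c = d
--         elif d % 2:
--             c = d // 2 + 1
--         else:
--             c = d // 2
--         if b1 is None:
--             b1 = c
--         elif c > b1:
--             b1, b2 = c, b1
--         elif b2 is None or c > b2:
--             b2 = c
--     if b2 is not None and b1 + b2 > m:
--         return b1 + b2
--     return 0 if m == -1 else m
-- ===== Notes on version B (the rewrite author's own statement) =====
-- stated objective: alternative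
-- what changed: B replaces A's three-pass pipeline (build the gap list, build the contribution list plus a second sort, then compare its top two) with a single fused scan over consecutive distinct values that keeps only three scalars: the largest gap and the two largest contributions.
import Mathlib
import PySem

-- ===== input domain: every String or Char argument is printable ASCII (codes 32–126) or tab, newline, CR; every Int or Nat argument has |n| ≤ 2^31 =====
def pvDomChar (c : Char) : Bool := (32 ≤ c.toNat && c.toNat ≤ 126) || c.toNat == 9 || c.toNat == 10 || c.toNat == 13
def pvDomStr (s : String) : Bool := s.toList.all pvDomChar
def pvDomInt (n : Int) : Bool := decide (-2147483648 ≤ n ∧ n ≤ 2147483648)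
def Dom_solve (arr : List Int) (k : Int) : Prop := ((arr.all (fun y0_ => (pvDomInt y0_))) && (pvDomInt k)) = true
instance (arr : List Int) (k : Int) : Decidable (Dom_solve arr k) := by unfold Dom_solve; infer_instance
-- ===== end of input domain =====

-- B fuses A's three passes (gap list, contribution list + second sort, final compare) into one
-- scan keeping only three scalars; equivalence is about the return value (both Pythons sort arr
-- in place identically).

-- ===== PORT A =====
-- for i in range(len(tmp)-1): skip if tmp[i]==tmp[i+1]-1 else append [tmp[i], tmp[i+1]-1]
def gapsA : List Int → List (Int × Int)
  | a :: b :: rest => if a = b - 1 then gapsA (b :: rest) else (a, b - 1) :: gapsA (b :: rest)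
  | _ => []

-- the second loop of A: builds lens and m
def stepA (k : Int) (st : List Int × Int) (i : Int × Int) : List Int × Int :=
  let d := i.2 - i.1
  let lens :=
    if i.1 = 0 then st.1 ++ [i.2 - i.1]
    else if i.2 = k then st.1 ++ [i.2 - i.1]
    else if PySem.Int.mod d 2 = 0 then st.1 ++ [PySem.Int.floordiv (i.2 - i.1) 2]
    else st.1 ++ [PySem.Int.floordiv (i.2 - i.1) 2 + 1]
  (lens, if d > st.2 then d else st.2)

def solve (arr : List Int) (k : Int) : Int :=
  let tmp := 0 :: PySem.List.sorted (PySem.Set.ofList arr) (fun x => x) false ++ [k + 1]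
  let idx_arr := gapsA tmp
  let st := idx_arr.foldl (stepA k) ([], -1)
  let lens := PySem.List.sorted st.1 (fun x => x) false
  let m := st.2
  if lens.length ≥ 2 ∧ PySem.List.pyGetD lens (-1) 0 + PySem.List.pyGetD lens (-2) 0 > m then
    PySem.List.pyGetD lens (-1) 0 + PySem.List.pyGetD lens (-2) 0
  else if m = -1 then 0 else m

-- ===== PORT B =====
-- B's top-two update (b1 is None / c>b1 / b2 is None or c>b2)
def upd2 (p : Option Int × Option Int) (c : Int) : Option Int × Option Int :=
  match p with
  | (none, b2) => (some c, b2)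
  | (some x, b2) =>
    if c > x then (some c, some x)
    else
      match b2 with
      | none => (some x, some c)
      | some y => if c > y then (some x, some c) else (some x, some y)

-- the fused loop body of B on one kept gap
def stepB (k : Int) (st : Int × Option Int × Option Int) (lo hi : Int) :
    Int × Option Int × Option Int :=
  let d := hi - lo
  let m := if d > st.1 then d else st.1
  let c :=
    if lo = 0 ∨ hi = k then d
    else if PySem.Int.mod d 2 ≠ 0 then PySem.Int.floordiv d 2 + 1
    else PySem.Int.floordiv d 2
  (m, upd2 st.2 c)

-- for lo, nxt in zip(tmp, tmp[1:]): …
def walkB (k : Int) : List Int → Int × Option Int × Option Int → Int × Option Int × Option Int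
  | a :: b :: rest, st =>
    if a = b - 1 then walkB k (b :: rest) st
    else walkB k (b :: rest) (stepB k st a (b - 1))
  | _, st => st

def solve_alt (arr : List Int) (k : Int) : Int :=
  let tmp := 0 :: PySem.List.sorted (PySem.Set.ofList arr) (fun x => x) false ++ [k + 1]
  let st := walkB k tmp (-1, none, none)
  match st with
  | (m, some x, some y) => if x + y > m then x + y else if m = -1 then 0 else m
  | (m, _, _) => if m = -1 then 0 else m

-- ===== PRECONDITION & SPEC =====
def Spec_solve (arr : List Int) (k : Int) (out : Int) : Prop := out = solve_alt arr k
instance (arr : List Int) (k : Int) (out : Int) : Decidable (Spec_solve arr k out) := by unfold Spec_solve; infer_instance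

-- ===== CLAIM (what is proved, stated in full; the proofs are below) =====
def Claim_equal_solve : Prop := ∀ (arr : List Int) (k : Int), Dom_solve arr k → Spec_solve arr k (solve arr k)

-- ===== LEMMAS AND PROOFS =====

-- B's walk over tmp is the fold of its step over A's gap list
theorem walkB_eq_foldl (k : Int) (t : List Int) (st : Int × Option Int × Option Int) :
    walkB k t st = (gapsA t).foldl (fun s (g : Int × Int) => stepB k s g.1 g.2) st := by
  induction t generalizing st with
  | nil => rfl
  | cons a t ih =>
    cases t with
    | nil => rfl
    | cons b rest =>
      simp only [walkB, gapsA]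
      by_cases h : a = b - 1 <;> simp [h, ih]

-- the top-two state seen as a fold over the lens list built so far
def T (l : List Int) : Option Int × Option Int := l.foldl upd2 (none, none)

theorem upd2_fst_some (p : Option Int × Option Int) (c : Int) :
    ∃ z w, upd2 p c = (some z, w) := by
  rcases p with ⟨u, v⟩
  cases u with
  | none => exact ⟨c, v, rfl⟩
  | some x =>
    cases v with
    | none =>
      by_cases h : c > x
      · exact ⟨c, some x, by simp [upd2, h]⟩
      · exact ⟨x, some c, by simp [upd2, h]⟩
    | some y =>
      by_cases h : c > x
      · exact ⟨c, some x, by simp [upd2, h]⟩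
      · by_cases h2 : c > y
        · exact ⟨x, some c, by simp [upd2, h, h2]⟩
        · exact ⟨x, some y, by simp [upd2, h, h2]⟩

theorem foldl_fst_some (xs : List Int) (p : Option Int × Option Int)
    (h : ∃ z, p.1 = some z) : ∃ z w, xs.foldl upd2 p = (some z, w) := by
  induction xs generalizing p with
  | nil => obtain ⟨z, hz⟩ := h; exact ⟨z, p.2, by simp [List.foldl_nil, ← hz]⟩
  | cons x xs ih =>
    obtain ⟨z, w, hz⟩ := upd2_fst_some p x
    exact ih (upd2 p x) ⟨z, by rw [hz]⟩

theorem upd2_snd_some (p : Option Int × Option Int) (c : Int) (y : Int)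
    (h : p.2 = some y) : ∃ z w, upd2 p c = (some z, some w) := by
  rcases p with ⟨u, v⟩
  cases h
  cases u with
  | none => exact ⟨c, y, rfl⟩
  | some x =>
    by_cases h1 : c > x
    · exact ⟨c, x, by simp [upd2, h1]⟩
    · by_cases h2 : c > y
      · exact ⟨x, c, by simp [upd2, h1, h2]⟩
      · exact ⟨x, y, by simp [upd2, h1, h2]⟩

theorem foldl_snd_some (xs : List Int) (p : Option Int × Option Int)
    (h : ∃ z w, p = (some z, some w)) : ∃ z w, xs.foldl upd2 p = (some z, some w) := by
  induction xs generalizing p with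
  | nil => simpa using h
  | cons x xs ih =>
    obtain ⟨z, w, hzw⟩ := h
    obtain ⟨z', w', h'⟩ := upd2_snd_some p x w (by rw [hzw])
    exact ih (upd2 p x) ⟨z', w', h'⟩

-- states with b1 = None only arise before any contribution: l = []
theorem T_none (l : List Int) (b2 : Option Int) (h : T l = (none, b2)) :
    l = [] ∧ b2 = none := by
  cases l with
  | nil =>
    rw [T, List.foldl_nil] at h
    injection h with h1 h2
    exact ⟨rfl, h2.symm⟩
  | cons x xs =>
    exfalso
    obtain ⟨z, w, hz⟩ := foldl_fst_some xs (upd2 (none, none) x) ⟨x, rfl⟩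
    rw [T, List.foldl_cons] at h
    rw [hz] at h
    simp at h

-- a state (some x, none) means exactly one contribution, x
theorem T_one (l : List Int) (x : Int) (h : T l = (some x, none)) : l = [x] := by
  cases l with
  | nil => simp [T] at h
  | cons a xs =>
    cases xs with
    | nil =>
      rw [T, List.foldl_cons, List.foldl_nil] at h
      have h0 : upd2 (none, none) a = (some a, none) := rfl
      rw [h0] at h
      injection h with h1 h2
      injection h1 with h1
      rw [h1]
    | cons b ys =>
      exfalso
      rw [T, List.foldl_cons, List.foldl_cons] at h
      have h1 : upd2 (none, none) a = (some a, none) := rfl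
      rw [h1] at h
      obtain ⟨z', w', h'⟩ := foldl_snd_some ys (upd2 (some a, none) b) (by
        by_cases hb : b > a
        · exact ⟨b, a, by simp [upd2, hb]⟩
        · exact ⟨a, b, by simp [upd2, hb]⟩)
      rw [h'] at h
      simp at h

-- main characterisation: a full state names the last two entries of sorted(l)
theorem T_two (l : List Int) : ∀ (x y : Int), T l = (some x, some y) →
    ∃ q, PySem.List.sorted l (fun v => v) false = q ++ [y, x] := by
  induction l using List.reverseRecOn with
  | nil => intro x y h; simp [T] at h
  | append_singleton l c ih =>
    intro x y h
    have hT : T (l ++ [c]) = upd2 (T l) c := by simp [T, List.foldl_append]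
    rw [hT] at h
    rcases hTl : T l with ⟨u, v⟩
    rw [hTl] at h
    cases u with
    | none =>
      obtain ⟨hl, hv⟩ := T_none l v hTl
      subst hl; subst hv
      simp [upd2] at h
    | some x0 =>
      cases v with
      | none =>
        have hl : l = [x0] := T_one l x0 hTl
        subst hl
        simp only [upd2] at h
        by_cases hc : c > x0
        · rw [if_pos hc] at h
          obtain ⟨h1, h2⟩ := Prod.mk.injEq .. ▸ h
          injection h with ha hb
          injection ha with ha; injection hb with hb
          subst ha; subst hb
          refine ⟨[], PySem.List.sorted_id_eq_of_perm_of_pairwise _ _ (List.Perm.refl _) ?_⟩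
          simp; omega
        · rw [if_neg hc] at h
          injection h with ha hb
          injection ha with ha; injection hb with hb
          subst ha; subst hb
          refine ⟨[], PySem.List.sorted_id_eq_of_perm_of_pairwise _ _ ?_ ?_⟩
          · simpa using (List.Perm.swap c x0 []).symm
          · simp; omega
      | some y0 =>
        obtain ⟨q, hq⟩ := ih x0 y0 hTl
        have hperm : (q ++ [y0, x0]).Perm l := by
          have := PySem.List.sorted_perm l (fun v => v) false
          rw [hq] at this; exact this
        have hpw : (q ++ [y0, x0]).Pairwise (fun a b => a ≤ b) := by
          have := PySem.List.sorted_pairwise l (fun v => v)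
          rw [hq] at this; exact this
        have hley : ∀ a ∈ q, a ≤ y0 := fun a ha =>
          (List.pairwise_append.mp hpw).2.2 a ha y0 (by simp)
        have hlex : ∀ a ∈ q, a ≤ x0 := fun a ha =>
          (List.pairwise_append.mp hpw).2.2 a ha x0 (by simp)
        have hyx : y0 ≤ x0 := by
          have := (List.pairwise_append.mp hpw).2.1; simpa using this
        have hpw2 : (q ++ [y0]).Pairwise (fun a b => a ≤ b) :=
          hpw.sublist (by simp : (q ++ [y0]).Sublist (q ++ [y0, x0]))
        have hpermc : ((q ++ [y0, x0]) ++ [c]).Perm (l ++ [c]) := hperm.append_right [c]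
        simp only [upd2] at h
        by_cases hc : c > x0
        · rw [if_pos hc] at h
          injection h with ha hb
          injection ha with ha; injection hb with hb
          subst ha; subst hb
          refine ⟨q ++ [y0], PySem.List.sorted_id_eq_of_perm_of_pairwise _ _ ?_ ?_⟩
          · simpa using hpermc
          · rw [List.pairwise_append]
            refine ⟨hpw2, by simp; omega, ?_⟩
            intro a ha b hb
            simp at ha hb
            rcases hb with rfl | rfl
            · rcases ha with ha | rfl
              · exact hlex a ha
              · exact hyx
            · rcases ha with ha | rfl
              · exact le_of_lt (lt_of_le_of_lt (hlex a ha) hc)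
              · omega
        · rw [if_neg hc] at h
          by_cases hc2 : c > y0
          · rw [if_pos hc2] at h
            injection h with ha hb
            injection ha with ha; injection hb with hb
            subst ha; subst hb
            refine ⟨q ++ [y0], PySem.List.sorted_id_eq_of_perm_of_pairwise _ _ ?_ ?_⟩
            · refine List.Perm.trans ?_ hpermc
              simp only [List.append_assoc, List.cons_append, List.nil_append]
              exact List.Perm.append_left q
                (List.Perm.cons y0 (List.Perm.swap c x0 []).symm)
            · rw [List.pairwise_append]
              refine ⟨hpw2, by simp; omega, ?_⟩
              intro a ha b hb
              simp at ha hb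
              rcases hb with rfl | rfl
              · rcases ha with ha | rfl
                · exact le_of_lt (lt_of_le_of_lt (hley a ha) hc2)
                · omega
              · rcases ha with ha | rfl
                · exact hlex a ha
                · exact hyx
          · rw [if_neg hc2] at h
            injection h with ha hb
            injection ha with ha; injection hb with hb
            subst ha; subst hb
            refine ⟨PySem.List.sorted (q ++ [c]) (fun v => v) false,
              PySem.List.sorted_id_eq_of_perm_of_pairwise _ _ ?_ ?_⟩
            · have hsp : (PySem.List.sorted (q ++ [c]) (fun v => v) false).Perm (q ++ [c]) :=
                PySem.List.sorted_perm _ _ _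
              refine List.Perm.trans ?_ hpermc
              have p1 : (PySem.List.sorted (q ++ [c]) (fun v => v) false ++ [y0, x0]).Perm
                  ((q ++ [c]) ++ [y0, x0]) := hsp.append_right _
              have p2 : ((q ++ [c]) ++ [y0, x0]).Perm ((q ++ [y0, x0]) ++ [c]) := by
                simp only [List.append_assoc]
                exact List.Perm.append_left q
                  (by simpa using List.perm_append_comm (l₁ := [c]) (l₂ := [y0, x0]))
              exact (p1.trans p2).trans (by simp)
            · have hmem : ∀ a ∈ PySem.List.sorted (q ++ [c]) (fun v => v) false, a ≤ y0 := by
                intro a ha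
                have ham : a ∈ q ++ [c] := (PySem.List.mem_sorted _ _ _ _).mp ha
                simp at ham
                rcases ham with hm | hm
                · exact hley a hm
                · subst hm; omega
              rw [List.pairwise_append]
              refine ⟨PySem.List.sorted_pairwise _ _, by simp [hyx], ?_⟩
              intro a ha b hb
              simp at hb
              rcases hb with rfl | rfl
              · exact hmem a ha
              · exact le_trans (hmem a ha) hyx

-- one B-step does exactly what one A-step does to (lens, m), seen through T
theorem fold_fusion (k : Int) (g : List (Int × Int)) (lens : List Int) (m : Int) :
    g.foldl (fun s (p : Int × Int) => stepB k s p.1 p.2) (m, T lens)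
      = ((g.foldl (stepA k) (lens, m)).2, T (g.foldl (stepA k) (lens, m)).1) := by
  induction g generalizing lens m with
  | nil => rfl
  | cons p g ih =>
    have hc :
        stepB k (m, T lens) p.1 p.2
          = ((stepA k (lens, m) p).2, T (stepA k (lens, m) p).1) := by
      rcases p with ⟨lo, hi⟩
      simp only [stepA, stepB]
      by_cases h1 : lo = 0
      · simp [h1, T, List.foldl_append]
      · by_cases h2 : hi = k
        · simp [h1, h2, T, List.foldl_append]
        · have hor : ¬(lo = 0 ∨ hi = k) := by tauto
          by_cases h3 : PySem.Int.mod (hi - lo) 2 = 0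
          · rw [if_neg h1, if_neg h2, if_neg hor, if_pos h3, if_neg (not_not_intro h3)]
            simp [T, List.foldl_append]
          · rw [if_neg h1, if_neg h2, if_neg hor, if_neg h3, if_pos h3]
            simp [T, List.foldl_append]
    simp only [List.foldl_cons, hc, ih]

-- ===== VERDICT (by name: the statement is the Claim_ definition above) =====
theorem solve_spec : Claim_equal_solve := by
  intro arr k _
  show solve arr k = solve_alt arr k
  simp only [solve, solve_alt]
  rw [walkB_eq_foldl]
  have hT0 : ((none, none) : Option Int × Option Int) = T [] := rfl
  rw [hT0, fold_fusion]
  set st := (gapsA (0 :: PySem.List.sorted (PySem.Set.ofList arr) (fun x => x) false ++ [k + 1])).foldl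
      (stepA k) ([], -1) with hst
  rcases hTc : T st.1 with ⟨b1, b2⟩
  cases b1 with
  | none =>
    obtain ⟨hnil, hb2⟩ := T_none st.1 b2 hTc
    subst hb2
    rw [hnil]
    simp
  | some x =>
    cases b2 with
    | none =>
      have hone : st.1 = [x] := T_one st.1 x hTc
      rw [hone]
      have hs : PySem.List.sorted [x] (fun v => v) false = [x] :=
        PySem.List.sorted_id_eq_of_perm_of_pairwise _ _ (List.Perm.refl _) (by simp)
      simp [hs]
    | some y =>
      obtain ⟨q, hq⟩ := T_two st.1 x y hTc
      have hlen : (PySem.List.sorted st.1 (fun v => v) false).length = q.length + 2 := by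
        rw [hq]; simp
      have hm1 : PySem.List.pyGetD (PySem.List.sorted st.1 (fun v => v) false) (-1) 0 = x := by
        rw [hq, show q ++ [y, x] = (q ++ [y]) ++ [x] by simp,
          PySem.List.pyGetD_neg_one_append_singleton]
      have hm2 : PySem.List.pyGetD (PySem.List.sorted st.1 (fun v => v) false) (-2) 0 = y := by
        rw [hq, PySem.List.pyGetD_neg_ofNat (q ++ [y, x]) 2 0 (by omega) (by simp)]
        simp
      rw [hm1, hm2, hlen]
      by_cases hcmp : x + y > st.2 <;> simp [hcmp]
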